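-- pv_equiv track=rewrite | github.com/acharayaP03/friend-finder | friends.py | find_all_matching_friends
-- ===== SOURCE A (Python) =====
-- def find_all_matching_friends(friends, friends_name):
--     matches = []
--     for friend in friends_name:
--         for search in friends:
--             if search.lower() in friend.lower():
--                 matches.append(friend)
--                 break
--     return matches
-- ===== SOURCE B (Python) =====
-- def find_all_matching_friends(friends, friends_name):
--     pats = [s.lower() for s in friends]
--     names_low = [n.lower() for n in friends_name]
--     matched = [False] * len(friends_name)
--     for p in pats:
--         matched = [m or (p in nl) for m, nl in zip(matched, names_low)]
--     return [n for n, m in zip(friends_name, matched) if m]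
-- ===== Notes on version B (the rewrite author's own statement) =====
-- stated objective: alternative
-- what changed: Swapped loop nesting: B lowercases every pattern and every name exactly once, then sweeps a boolean match mask over the names once per pattern and filters by the mask, instead of A's per-name inner scan over the raw patterns with repeated lowering and break.
import Mathlib
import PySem

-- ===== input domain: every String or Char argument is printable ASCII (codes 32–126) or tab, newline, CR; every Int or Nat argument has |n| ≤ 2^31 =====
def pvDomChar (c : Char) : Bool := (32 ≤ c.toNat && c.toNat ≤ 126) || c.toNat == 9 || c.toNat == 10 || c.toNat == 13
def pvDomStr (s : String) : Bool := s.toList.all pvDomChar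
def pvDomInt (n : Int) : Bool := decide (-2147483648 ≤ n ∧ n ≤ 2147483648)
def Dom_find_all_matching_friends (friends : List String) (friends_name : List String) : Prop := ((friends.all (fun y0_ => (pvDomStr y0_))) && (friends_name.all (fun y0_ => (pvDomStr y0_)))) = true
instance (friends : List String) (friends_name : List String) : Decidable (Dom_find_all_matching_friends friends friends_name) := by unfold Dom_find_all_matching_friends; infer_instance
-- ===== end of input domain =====

-- B swaps the loop nesting: it lowercases each pattern and each name once, sweeps a boolean
-- match mask over the names once per pattern, and filters names by the mask (same values as A).

-- ===== PORT A =====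
-- inner 'for search in friends: if …: append; break' loop, with the accumulator 'ms'
def pvInnerA (friend : String) : List String → List String → List String
  | [], ms => ms
  | s :: rest, ms =>
    if PySem.Str.isIn (PySem.Str.lower s) (PySem.Str.lower friend) then ms ++ [friend]
    else pvInnerA friend rest ms

def find_all_matching_friends (friends : List String) (friends_name : List String) : List String :=
  friends_name.foldl (fun ms friend => pvInnerA friend friends ms) []

-- ===== PORT B =====
def find_all_matching_friends_alt (friends : List String) (friends_name : List String) : List String :=
  let pats := friends.map PySem.Str.lower
  let namesLow := friends_name.map PySem.Str.lower
  let matched := pats.foldl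
    (fun m p => List.zipWith (fun mi nl => mi || PySem.Str.isIn p nl) m namesLow)
    (List.replicate friends_name.length false)
  (friends_name.zip matched).filterMap (fun nm => if nm.2 then some nm.1 else none)

-- ===== PRECONDITION & SPEC =====
def Spec_find_all_matching_friends (friends : List String) (friends_name : List String) (out : List String) : Prop := out = find_all_matching_friends_alt friends friends_name
instance (friends : List String) (friends_name : List String) (out : List String) : Decidable (Spec_find_all_matching_friends friends friends_name out) := by unfold Spec_find_all_matching_friends; infer_instance

-- ===== CLAIM (what is proved, stated in full; the proofs are below) =====
def Claim_equal_find_all_matching_friends : Prop := ∀ (friends : List String) (friends_name : List String), Dom_find_all_matching_friends friends friends_name → Spec_find_all_matching_friends friends friends_name (find_all_matching_friends friends friends_name)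

-- ===== LEMMAS AND PROOFS =====

-- A's inner loop appends 'friend' iff some pattern ms
theorem pvInnerA_eq (friend : String) (searches ms : List String) :
    pvInnerA friend searches ms =
      ms ++ (if searches.any (fun s => PySem.Str.isIn (PySem.Str.lower s) (PySem.Str.lower friend)) then [friend] else []) := by
  induction searches with
  | nil => simp [pvInnerA]
  | cons s rest ih =>
    unfold pvInnerA
    by_cases h : PySem.Str.isIn (PySem.Str.lower s) (PySem.Str.lower friend) = true
    · rw [if_pos h, List.any_cons, h, Bool.true_or, if_pos rfl]
    · rw [if_neg h, ih, List.any_cons, Bool.eq_false_iff.mpr h, Bool.false_or]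

-- A is a filter by "some pattern ms"
theorem portA_eq_filter (friends : List String) : ∀ (names acc : List String),
    names.foldl (fun ms friend => pvInnerA friend friends ms) acc =
      acc ++ names.filter (fun n => friends.any (fun s => PySem.Str.isIn (PySem.Str.lower s) (PySem.Str.lower n))) := by
  intro names
  induction names with
  | nil => simp
  | cons n rest ih =>
    intro acc
    rw [List.foldl_cons, pvInnerA_eq, ih, List.filter_cons]
    cases h : friends.any (fun s => PySem.Str.isIn (PySem.Str.lower s) (PySem.Str.lower n)) with
    | true => rw [if_pos rfl, if_pos rfl, List.append_assoc, List.singleton_append]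
    | false => rw [if_neg (by simp), if_neg (by simp), List.append_nil]

-- zipWith of a list against its own map is a map
theorem zipWith_map_self (f : Bool → String → Bool) (g : String → Bool) :
    ∀ l : List String, List.zipWith f (l.map g) l = l.map (fun nl => f (g nl) nl) := by
  intro l
  induction l with
  | nil => rfl
  | cons x xs ih => simp [ih]

-- B's mask sweep, in closed form
theorem mask_foldl_eq (namesLow : List String) : ∀ (pats : List String) (g : String → Bool),
    pats.foldl (fun m p => List.zipWith (fun mi nl => mi || PySem.Str.isIn p nl) m namesLow) (namesLow.map g) =
      namesLow.map (fun nl => g nl || pats.any (fun p => PySem.Str.isIn p nl)) := by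
  intro pats
  induction pats with
  | nil => simp
  | cons p rest ih =>
    intro g
    simp only [List.foldl_cons, zipWith_map_self, ih]
    apply List.map_congr_left
    intro nl _
    simp [Bool.or_assoc]

-- zip-with-own-map then filterMap is a filter
theorem zip_map_filterMap (q : String → Bool) : ∀ (l : List String),
    ((l.zip (l.map q)).filterMap (fun nm => if nm.2 then some nm.1 else none)) = l.filter q := by
  intro l
  induction l with
  | nil => rfl
  | cons x xs ih =>
    simp only [List.map_cons, List.zip_cons_cons, List.filterMap_cons, List.filter_cons]
    by_cases h : q x = true
    · simp [h, ih]
    · simp [h, ih]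

-- ===== VERDICT (by name: the statement is the Claim_ definition above) =====
theorem find_all_matching_friends_spec : Claim_equal_find_all_matching_friends := by
  intro friends friends_name _
  show find_all_matching_friends friends friends_name = find_all_matching_friends_alt friends friends_name
  have hrep : List.replicate friends_name.length false =
      (friends_name.map PySem.Str.lower).map (fun _ => false) := by simp
  rw [find_all_matching_friends, portA_eq_filter, List.nil_append]
  simp only [find_all_matching_friends_alt]
  rw [hrep, mask_foldl_eq]
  simp only [Bool.false_or, List.map_map]
  rw [zip_map_filterMap]
  apply List.filter_congr
  intro n _
  simp [List.any_map, Function.comp_def, PySem.Str.toList_lower]
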